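-- pv_equiv track=rewrite | github.com/Avallon-Labs/avallon-citations | scripts/find_citation.py | _extract_non_table_text
-- ===== SOURCE A (Python) =====
-- def _extract_non_table_text(md_content: str, tables: list[dict]) -> list[str]:
--     """Extract paragraphs from markdown that are NOT inside tables."""
--     lines = md_content.split("\n")
--     table_lines = set()
--     for table in tables:
--         for ln in range(table["start_line"], table["end_line"] + 1):
--             table_lines.add(ln)
--
--     paragraphs = []
--     current = []
--     for i, line in enumerate(lines):
--         if i in table_lines:
--             if current:
--                 paragraphs.append("\n".join(current))
--                 current = []
--             continue
--         if line.strip():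
--             current.append(line)
--         elif current:
--             paragraphs.append("\n".join(current))
--             current = []
--     if current:
--         paragraphs.append("\n".join(current))
--     return paragraphs
-- ===== SOURCE B (Python) =====
-- def _extract_non_table_text(md_content: str, tables: list[dict]) -> list[str]:
--     """Extract paragraphs from markdown that are NOT inside tables."""
--     lines = md_content.split("\n")
--     n = len(lines)
--
--     def keep(i):
--         return bool(lines[i].strip()) and not any(
--             t["start_line"] <= i <= t["end_line"] for t in tables)
--
--     paragraphs = []
--     i = 0
--     while i < n:
--         if keep(i):
--             j = i
--             while j < n and keep(j):
--                 j += 1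
--             paragraphs.append("\n".join(lines[i:j]))
--             i = j
--         else:
--             i += 1
--     return paragraphs
-- ===== Notes on version B (the rewrite author's own statement) =====
-- stated objective: alternative
-- what changed: Replaces the flush-accumulator pass over a materialized table_lines set by an index two-pointer scan that detects each maximal run of kept lines and joins a slice, testing table membership directly against the [start_line, end_line] intervals instead of building a set of all covered line numbers.
import Mathlib
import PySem

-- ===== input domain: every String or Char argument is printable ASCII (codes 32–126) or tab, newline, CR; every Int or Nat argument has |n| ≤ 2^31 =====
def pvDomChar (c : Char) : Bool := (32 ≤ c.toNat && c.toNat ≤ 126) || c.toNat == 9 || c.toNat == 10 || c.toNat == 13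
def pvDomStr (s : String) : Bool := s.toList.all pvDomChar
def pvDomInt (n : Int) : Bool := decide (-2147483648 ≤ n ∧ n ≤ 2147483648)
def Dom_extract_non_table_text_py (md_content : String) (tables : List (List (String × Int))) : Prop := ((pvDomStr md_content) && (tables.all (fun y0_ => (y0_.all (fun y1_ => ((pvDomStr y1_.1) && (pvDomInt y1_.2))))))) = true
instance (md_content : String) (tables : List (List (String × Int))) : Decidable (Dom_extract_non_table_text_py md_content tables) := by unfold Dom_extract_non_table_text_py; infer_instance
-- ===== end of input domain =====

-- B replaces the table_lines set and the flush-accumulator loop by a two-pointer scan over line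
-- indexes that joins one slice per maximal run of kept lines, testing the table intervals directly
-- (alternative decomposition, no speed claim).

-- ===== PORT A =====
-- table["start_line"] / table["end_line"]: total forms, exact under Pre_ (both keys present)
def pvStartD (t : List (String × Int)) : Int := ((PySem.Dict.mk t).get? "start_line").getD 0
def pvEndD (t : List (String × Int)) : Int := ((PySem.Dict.mk t).get? "end_line").getD 0

-- the nested 'for table in tables: for ln in range(...): table_lines.add(ln)'
def pvTableSet (tables : List (List (String × Int))) : PySem.Set Int :=
  tables.foldl
    (fun s t => (PySem.List.pyRange (pvStartD t) (pvEndD t + 1) 1).foldl PySem.Set.add s)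
    PySem.Set.empty

-- the body of A's 'for i, line in enumerate(lines)' loop; state = (paragraphs, current)
def pvStepA (tl : PySem.Set Int) (st : List String × List String) (p : Int × String) :
    List String × List String :=
  if PySem.Set.contains tl p.1 then
    (if st.2 = [] then st else (st.1 ++ [PySem.Str.join "\n" st.2], []))
  else if PySem.Str.strip p.2 ≠ "" then
    (st.1, st.2 ++ [p.2])
  else if st.2 ≠ [] then
    (st.1 ++ [PySem.Str.join "\n" st.2], [])
  else st

def extract_non_table_text_py (md_content : String) (tables : List (List (String × Int))) : List String :=
  let lines := (PySem.Str.split? md_content "\n").getD []   -- sep = "\n" ≠ "", so split? is some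
  let tl := pvTableSet tables
  let st := (PySem.List.enumerate lines 0).foldl (pvStepA tl) ([], [])
  if st.2 = [] then st.1 else st.1 ++ [PySem.Str.join "\n" st.2]

-- ===== PORT B =====
-- 'any(t["start_line"] <= i <= t["end_line"] for t in tables)'
def pvInTable (tables : List (List (String × Int))) (i : Int) : Bool :=
  tables.any (fun t => decide (pvStartD t ≤ i) && decide (i ≤ pvEndD t))

-- B's 'keep(i)'
def pvKeep (lines : List String) (tables : List (List (String × Int))) (i : Nat) : Bool :=
  (PySem.Str.strip (lines.getD i "") != "") && !(pvInTable tables (i : Int))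

-- B's inner 'while j < n and keep(j): j += 1'
def pvRunEnd (lines : List String) (tables : List (List (String × Int))) (j : Nat) : Nat :=
  if j < lines.length then
    if pvKeep lines tables j then pvRunEnd lines tables (j + 1) else j
  else j
termination_by lines.length - j

theorem pvRunEnd_ge (lines : List String) (tables : List (List (String × Int))) (j : Nat) :
    j ≤ pvRunEnd lines tables j := by
  rw [pvRunEnd]
  split
  · split
    · have := pvRunEnd_ge lines tables (j + 1); omega
    · exact Nat.le_refl j
  · exact Nat.le_refl j
termination_by lines.length - j

theorem pvRunEnd_of_keep (lines : List String) (tables : List (List (String × Int))) (j : Nat)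
    (h : j < lines.length) (hk : pvKeep lines tables j = true) :
    pvRunEnd lines tables j = pvRunEnd lines tables (j + 1) := by
  conv_lhs => rw [pvRunEnd]
  simp [h, hk]

-- B's outer 'while i < n' loop; each kept run becomes one joined slice
def pvScan (lines : List String) (tables : List (List (String × Int))) (i : Nat) : List String :=
  if h : i < lines.length then
    if hk : pvKeep lines tables i then
      PySem.Str.join "\n"
          (PySem.List.slice lines (some (i : Int)) (some ((pvRunEnd lines tables i : Nat) : Int)))
        :: pvScan lines tables (pvRunEnd lines tables i)
    else pvScan lines tables (i + 1)
  else []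
termination_by lines.length - i
decreasing_by
  · have h1 := pvRunEnd_of_keep lines tables i h hk
    have h2 := pvRunEnd_ge lines tables (i + 1)
    omega
  · omega

def extract_non_table_text_py_alt (md_content : String) (tables : List (List (String × Int))) : List String :=
  pvScan ((PySem.Str.split? md_content "\n").getD []) tables 0

-- ===== PRECONDITION & SPEC =====
-- Pre_ excludes exactly the inputs where Python A raises KeyError: a table dict missing
-- the "start_line" or "end_line" key.
def Pre_extract_non_table_text_py (md_content : String) (tables : List (List (String × Int))) : Prop :=
  ∀ t ∈ tables, ((PySem.Dict.mk t).get? "start_line").isSome ∧ ((PySem.Dict.mk t).get? "end_line").isSome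
instance (md_content : String) (tables : List (List (String × Int))) : Decidable (Pre_extract_non_table_text_py md_content tables) := by unfold Pre_extract_non_table_text_py; infer_instance

def pvWitness_extract_non_table_text_py : String × (List (List (String × Int))) :=
  ("a\nb\n\nc", [[("start_line", 1), ("end_line", 1)]])

def Spec_extract_non_table_text_py (md_content : String) (tables : List (List (String × Int))) (out : List String) : Prop := out = extract_non_table_text_py_alt md_content tables
instance (md_content : String) (tables : List (List (String × Int))) (out : List String) : Decidable (Spec_extract_non_table_text_py md_content tables out) := by unfold Spec_extract_non_table_text_py; infer_instance

-- ===== CLAIM (what is proved, stated in full; the proofs are below) =====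
def Claim_equal_extract_non_table_text_py : Prop := ∀ (md_content : String) (tables : List (List (String × Int))), Dom_extract_non_table_text_py md_content tables → Pre_extract_non_table_text_py md_content tables → Spec_extract_non_table_text_py md_content tables (extract_non_table_text_py md_content tables)

-- ===== LEMMAS AND PROOFS =====

theorem pvWitness_ok :
    Dom_extract_non_table_text_py pvWitness_extract_non_table_text_py.1 pvWitness_extract_non_table_text_py.2 ∧
    Pre_extract_non_table_text_py pvWitness_extract_non_table_text_py.1 pvWitness_extract_non_table_text_py.2 := by
  decide

-- A's trailing 'if current: paragraphs.append(...)'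
def pvFinish (st : List String × List String) : List String :=
  if st.2 = [] then st.1 else st.1 ++ [PySem.Str.join "\n" st.2]

theorem mem_foldl_add {x : Int} (l : List Int) (s : PySem.Set Int) :
    x ∈ l.foldl PySem.Set.add s ↔ x ∈ s ∨ x ∈ l := by
  induction l generalizing s with
  | nil => simp
  | cons a l ih => simp [List.foldl_cons, ih, PySem.Set.mem_add]; tauto

theorem mem_pvTableSet (tables : List (List (String × Int))) (x : Int) :
    PySem.Set.contains (pvTableSet tables) x = pvInTable tables x := by
  rw [Bool.eq_iff_iff, PySem.Set.contains_iff]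
  unfold pvTableSet pvInTable
  rw [List.any_eq_true]
  have main : ∀ (ts : List (List (String × Int))) (s : PySem.Set Int),
      x ∈ ts.foldl (fun s t => (PySem.List.pyRange (pvStartD t) (pvEndD t + 1) 1).foldl PySem.Set.add s) s ↔
      x ∈ s ∨ ∃ t ∈ ts, pvStartD t ≤ x ∧ x ≤ pvEndD t := by
    intro ts
    induction ts with
    | nil => simp
    | cons t ts ih =>
      intro s
      simp only [List.foldl_cons, ih, mem_foldl_add, PySem.List.mem_pyRange_one, List.mem_cons]
      constructor
      · rintro ((h | h) | ⟨u, hu, h⟩)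
        · exact Or.inl h
        · exact Or.inr ⟨t, Or.inl rfl, h.1, by omega⟩
        · exact Or.inr ⟨u, Or.inr hu, h⟩
      · rintro (h | ⟨u, (rfl | hu), h⟩)
        · exact Or.inl (Or.inl h)
        · exact Or.inl (Or.inr ⟨h.1, by omega⟩)
        · exact Or.inr ⟨u, hu, h⟩
  rw [main]
  simp only [PySem.Set.empty, List.not_mem_nil, false_or]
  constructor
  · rintro ⟨t, ht, h1, h2⟩; exact ⟨t, ht, by simpa using And.intro h1 h2⟩
  · rintro ⟨t, ht, h⟩; exact ⟨t, ht, by simpa using h⟩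

theorem pvRunEnd_of_stop (lines : List String) (tables : List (List (String × Int))) (j : Nat)
    (h : ¬ (j < lines.length ∧ pvKeep lines tables j = true)) :
    pvRunEnd lines tables j = j := by
  conv_lhs => rw [pvRunEnd]
  by_cases hj : j < lines.length
  · have hf : pvKeep lines tables j = false := by
      revert h; cases pvKeep lines tables j <;> simp_all
    simp [hj, hf]
  · simp [hj]

theorem pvScan_unfold_keep (lines : List String) (tables : List (List (String × Int))) (i : Nat)
    (h : i < lines.length) (hk : pvKeep lines tables i = true) :
    pvScan lines tables i =
      PySem.Str.join "\n"
          (PySem.List.slice lines (some (i : Int)) (some ((pvRunEnd lines tables i : Nat) : Int)))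
        :: pvScan lines tables (pvRunEnd lines tables i) := by
  rw [pvScan]; simp [h, hk]

theorem pvScan_unfold_skip (lines : List String) (tables : List (List (String × Int))) (i : Nat)
    (h : i < lines.length) (hk : pvKeep lines tables i = false) :
    pvScan lines tables i = pvScan lines tables (i + 1) := by
  rw [pvScan]; simp [h, hk]

theorem pvScan_unfold_end (lines : List String) (tables : List (List (String × Int))) (i : Nat)
    (h : ¬ i < lines.length) : pvScan lines tables i = [] := by
  rw [pvScan]; simp [h]

theorem pvSlice_cons (lines : List String) (i j : Nat) (hi : i < lines.length) (hij : i < j) :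
    PySem.List.slice lines (some (i : Int)) (some (j : Int)) =
      lines[i] :: PySem.List.slice lines (some ((i + 1 : Nat) : Int)) (some (j : Int)) := by
  rw [PySem.List.slice_natCast, PySem.List.slice_natCast]
  rw [List.drop_eq_getElem_cons hi]
  have hj : j - i = (j - (i + 1)) + 1 := by omega
  rw [hj, List.take_succ_cons]

-- the glue between A's in-flight buffer 'cur' at index i and B's remaining scan
def pvGlue (lines : List String) (tables : List (List (String × Int)))
    (cur : List String) (i : Nat) : List String :=
  if cur = [] then pvScan lines tables i
  else if i < lines.length ∧ pvKeep lines tables i then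
    PySem.Str.join "\n"
        (cur ++ PySem.List.slice lines (some (i : Int)) (some ((pvRunEnd lines tables i : Nat) : Int)))
      :: pvScan lines tables (pvRunEnd lines tables i)
  else PySem.Str.join "\n" cur :: pvScan lines tables i

theorem pvGlue_nil (lines : List String) (tables : List (List (String × Int))) (i : Nat) :
    pvGlue lines tables [] i = pvScan lines tables i := by
  unfold pvGlue; simp

theorem pvGlue_keep (lines : List String) (tables : List (List (String × Int)))
    (cur : List String) (i : Nat) (h : i < lines.length) (hk : pvKeep lines tables i = true) :
    pvGlue lines tables cur i =
      PySem.Str.join "\n"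
          (cur ++ PySem.List.slice lines (some (i : Int)) (some ((pvRunEnd lines tables i : Nat) : Int)))
        :: pvScan lines tables (pvRunEnd lines tables i) := by
  unfold pvGlue
  by_cases hc : cur = []
  · subst hc
    rw [if_pos rfl, pvScan_unfold_keep lines tables i h hk]
    simp
  · simp [hc, h, hk]

theorem pvGlue_flush (lines : List String) (tables : List (List (String × Int)))
    (cur : List String) (i : Nat) (hc : cur ≠ [])
    (hk : ¬ (i < lines.length ∧ pvKeep lines tables i = true)) :
    pvGlue lines tables cur i = PySem.Str.join "\n" cur :: pvScan lines tables i := by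
  unfold pvGlue
  simp [hc, hk]

theorem pvMain (lines : List String) (tables : List (List (String × Int))) (i : Nat)
    (ps cur : List String) :
    pvFinish ((PySem.List.enumerate (lines.drop i) (i : Int)).foldl
        (pvStepA (pvTableSet tables)) (ps, cur)) =
      ps ++ pvGlue lines tables cur i := by
  by_cases h : i < lines.length
  · rw [List.drop_eq_getElem_cons h, PySem.List.enumerate_cons, List.foldl_cons]
    have hkeep : pvKeep lines tables i =
        ((PySem.Str.strip lines[i] != "") && !(pvInTable tables (i : Int))) := by
      unfold pvKeep
      rw [List.getD_eq_getElem lines "" h]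
    have hcast : (i : Int) + 1 = ((i + 1 : Nat) : Int) := by push_cast; ring
    by_cases hk : pvKeep lines tables i = true
    · -- kept line: A accumulates
      obtain ⟨hstrip, hnotin⟩ := Bool.and_eq_true_iff.mp (hkeep ▸ hk)
      have htab : pvInTable tables (i : Int) = false := by
        revert hnotin; cases pvInTable tables (i : Int) <;> simp
      have hstrip' : PySem.Str.strip lines[i] ≠ "" := bne_iff_ne.mp hstrip
      have hstep : pvStepA (pvTableSet tables) (ps, cur) ((i : Int), lines[i]) =
          (ps, cur ++ [lines[i]]) := by
        unfold pvStepA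
        rw [mem_pvTableSet]
        simp [htab, hstrip']
      rw [hstep, hcast, pvMain lines tables (i + 1) ps (cur ++ [lines[i]])]
      rw [pvGlue_keep lines tables cur i h hk]
      have hrun : pvRunEnd lines tables i = pvRunEnd lines tables (i + 1) :=
        pvRunEnd_of_keep lines tables i h hk
      by_cases hk1 : (i + 1) < lines.length ∧ pvKeep lines tables (i + 1) = true
      · rw [pvGlue_keep lines tables (cur ++ [lines[i]]) (i + 1) hk1.1 hk1.2, hrun]
        rw [pvSlice_cons lines i (pvRunEnd lines tables (i + 1)) h
            (by have := pvRunEnd_ge lines tables (i + 1); omega)]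
        simp [List.append_assoc]
      · have hrun1 : pvRunEnd lines tables (i + 1) = i + 1 :=
          pvRunEnd_of_stop lines tables (i + 1) hk1
        rw [pvGlue_flush lines tables (cur ++ [lines[i]]) (i + 1) (by simp) hk1, hrun, hrun1]
        rw [pvSlice_cons lines i (i + 1) h (by omega)]
        have hnilslice : PySem.List.slice lines (some ((i + 1 : Nat) : Int))
            (some ((i + 1 : Nat) : Int)) = [] := by
          rw [PySem.List.slice_natCast]; simp
        rw [hnilslice]
    · -- table line or blank line: A flushes
      have hkf : pvKeep lines tables i = false := by
        revert hk; cases pvKeep lines tables i <;> simp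
      have hstep : pvStepA (pvTableSet tables) (ps, cur) ((i : Int), lines[i]) =
          ((if cur = [] then ps else ps ++ [PySem.Str.join "\n" cur]), []) := by
        unfold pvStepA
        rw [mem_pvTableSet]
        by_cases htab : pvInTable tables (i : Int) = true
        · by_cases hc : cur = [] <;> simp [htab, hc]
        · have htab' : pvInTable tables (i : Int) = false := by
            revert htab; cases pvInTable tables (i : Int) <;> simp
          have hstrip : PySem.Str.strip lines[i] = "" := by
            rw [hkeep, htab'] at hkf
            simpa using hkf
          by_cases hc : cur = [] <;> simp [htab', hstrip, hc]
      rw [hstep, hcast,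
        pvMain lines tables (i + 1) (if cur = [] then ps else ps ++ [PySem.Str.join "\n" cur]) []]
      rw [pvGlue_nil, ← pvScan_unfold_skip lines tables i h hkf]
      by_cases hc : cur = []
      · rw [if_pos hc, hc, pvGlue_nil]
      · rw [if_neg hc, pvGlue_flush lines tables cur i hc (by simp [hkf])]
        simp [List.append_assoc]
  · -- i ≥ lines.length: loop over, final flush
    have hdrop : lines.drop i = [] := List.drop_eq_nil_of_le (by omega)
    rw [hdrop]
    simp only [PySem.List.enumerate_nil, List.foldl_nil]
    unfold pvFinish pvGlue
    rw [pvScan_unfold_end lines tables i h]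
    by_cases hc : cur = []
    · simp [hc]
    · simp [hc, h]
termination_by lines.length - i

-- ===== VERDICT (by name: the statement is the Claim_ definition above) =====
theorem extract_non_table_text_py_spec : Claim_equal_extract_non_table_text_py := by
  intro md_content tables _hdom _hpre
  unfold Spec_extract_non_table_text_py extract_non_table_text_py extract_non_table_text_py_alt
  have hmain := pvMain ((PySem.Str.split? md_content "\n").getD []) tables 0 [] []
  simp only [List.drop_zero, Nat.cast_zero, pvFinish] at hmain
  simp only []
  rw [hmain, pvGlue_nil]
  simp
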